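-- pv_equiv track=rewrite | github.com/chechere10/Ramirez | backend/app/services/busqueda_service.py | _insertar_separadores
-- ===== SOURCE A (Python) =====
-- def _insertar_separadores(codigo: str, sep: str) -> str:
--     """Inserta separadores en transiciones letra-número."""
--     if not codigo:
--         return codigo
--
--     resultado = [codigo[0]]
--     for i in range(1, len(codigo)):
--         actual = codigo[i]
--         anterior = codigo[i - 1]
--
--         if (anterior.isalpha() and actual.isdigit()) or \
--            (anterior.isdigit() and actual.isalpha()):
--             resultado.append(sep)
--
--         resultado.append(actual)
--
--     return "".join(resultado)
-- ===== SOURCE B (Python) =====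
-- def _insertar_separadores(codigo: str, sep: str) -> str:
--     """Run-based rewrite: split into maximal alpha/digit/other runs, join with
--     sep at alpha<->digit run boundaries."""
--     def cat(c):
--         return 'A' if c.isalpha() else ('D' if c.isdigit() else 'O')
--
--     out = []
--     prev = None
--     i = 0
--     n = len(codigo)
--     while i < n:
--         k = cat(codigo[i])
--         j = i + 1
--         while j < n and cat(codigo[j]) == k:
--             j += 1
--         if prev is not None and {prev, k} == {'A', 'D'}:
--             out.append(sep)
--         out.append(codigo[i:j])
--         prev = k
--         i = j
--     return ''.join(out)
-- ===== Notes on version B (the rewrite author's own statement) =====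
-- stated objective: alternative
-- what changed: A scans character-by-character comparing codigo[i-1] with codigo[i]; B first classifies characters into alpha/digit/other categories and consumes maximal runs of one category, inserting sep only at alpha<->digit run boundaries.
import Mathlib
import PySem

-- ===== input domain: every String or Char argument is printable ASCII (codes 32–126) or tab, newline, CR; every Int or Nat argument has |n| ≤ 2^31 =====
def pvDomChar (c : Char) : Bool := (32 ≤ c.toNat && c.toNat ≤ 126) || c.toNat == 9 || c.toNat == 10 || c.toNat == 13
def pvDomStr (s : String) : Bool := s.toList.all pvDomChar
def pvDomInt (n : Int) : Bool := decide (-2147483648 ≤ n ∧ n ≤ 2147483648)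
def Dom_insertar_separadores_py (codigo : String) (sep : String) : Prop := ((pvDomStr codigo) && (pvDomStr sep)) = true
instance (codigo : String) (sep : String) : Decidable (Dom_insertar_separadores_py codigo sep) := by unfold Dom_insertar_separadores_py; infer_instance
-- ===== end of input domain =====

-- B replaces A's per-character look-behind loop by a two-level run decomposition
-- (maximal alpha/digit/other runs, separator only at alpha<->digit run boundaries);
-- objective: alternative decomposition, same cost.

-- ===== PORT A =====
-- the transition test of A's loop body, verbatim
def pvTransA (anterior actual : Char) : Bool :=
  (PySem.Chars.isalpha anterior && PySem.Chars.isdigit actual) ||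
  (PySem.Chars.isdigit anterior && PySem.Chars.isalpha actual)

-- one iteration of A's `for i in range(1, len(codigo))` body; `resultado` is the
-- list of appended strings, each kept as its character list ("".join = flatten)
def pvStepA (cs : List Char) (sep : String) (res : List (List Char)) (i : Int) : List (List Char) :=
  let actual := PySem.List.pyGetD cs i ' '
  let anterior := PySem.List.pyGetD cs (i - 1) ' '
  let res := if pvTransA anterior actual then res ++ [sep.toList] else res
  res ++ [[actual]]

def insertar_separadores_py (codigo : String) (sep : String) : String :=
  let cs := codigo.toList
  if cs.isEmpty then codigo
  else
    let resultado : List (List Char) := [[PySem.List.pyGetD cs 0 ' ']]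
    let resultado := (PySem.List.pyRange 1 (PySem.List.len cs) 1).foldl (pvStepA cs sep) resultado
    String.ofList (PySem.Chars.join [] resultado)

-- ===== PORT B =====
-- character category, as Source B's cat: 'A' if isalpha else 'D' if isdigit else 'O'
inductive PvCat
  | A | D | O
deriving DecidableEq, Repr

def pvCat (c : Char) : PvCat :=
  if PySem.Chars.isalpha c then PvCat.A else if PySem.Chars.isdigit c then PvCat.D else PvCat.O

-- Source B's `prev is not None and {prev, k} == {'A', 'D'}`
def pvSepNeeded : Option PvCat → PvCat → Bool
  | none, _ => false
  | some p, k => decide (p ≠ k) && decide (p ≠ PvCat.O) && decide (k ≠ PvCat.O)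

-- Source B's outer while loop: each step consumes one maximal run codigo[i:j]
-- (the inner `while j < n and cat(codigo[j]) == k` is the takeWhile/dropWhile split)
def pvAltGo (sep : List Char) (prev : Option PvCat) (l : List Char) : List Char :=
  match l with
  | [] => []
  | c :: rest =>
    let k := pvCat c
    let run := rest.takeWhile (fun d => decide (pvCat d = k))
    let rest' := rest.dropWhile (fun d => decide (pvCat d = k))
    (if pvSepNeeded prev k then sep else []) ++ (c :: run) ++ pvAltGo sep (some k) rest'
termination_by l.length
decreasing_by
  have := List.length_dropWhile_le (p := fun d => decide (pvCat d = pvCat c)) (l := rest)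
  simp only [List.length_cons]
  omega

def insertar_separadores_py_alt (codigo : String) (sep : String) : String :=
  String.ofList (pvAltGo sep.toList none codigo.toList)

-- ===== PRECONDITION & SPEC =====
def Spec_insertar_separadores_py (codigo : String) (sep : String) (out : String) : Prop := out = insertar_separadores_py_alt codigo sep
instance (codigo : String) (sep : String) (out : String) : Decidable (Spec_insertar_separadores_py codigo sep out) := by unfold Spec_insertar_separadores_py; infer_instance

-- ===== CLAIM (what is proved, stated in full; the proofs are below) =====
def Claim_equal_insertar_separadores_py : Prop := ∀ (codigo : String) (sep : String), Dom_insertar_separadores_py codigo sep → Spec_insertar_separadores_py codigo sep (insertar_separadores_py codigo sep)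

-- ===== LEMMAS AND PROOFS =====

-- character-level result of A's loop, recursion on adjacent pairs with the category of the previous char
def pvPairs (sep : List Char) (k : PvCat) : List Char → List Char
  | [] => []
  | y :: r => (if pvSepNeeded (some k) (pvCat y) then sep else []) ++ y :: pvPairs sep (pvCat y) r

-- the list of strings A's loop appends after the seed, pairwise recursion
def pvPairsL (sep : String) (x : Char) : List Char → List (List Char)
  | [] => []
  | y :: r => (if pvTransA x y then [sep.toList] else []) ++ [[y]] ++ pvPairsL sep y r

theorem pvJoinNil (xss : List (List Char)) : PySem.Chars.join [] xss = xss.flatten := by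
  match xss with
  | [] => simp [PySem.Chars.join_nil]
  | [p] => simp [PySem.Chars.join_singleton]
  | p :: q :: rest =>
    rw [PySem.Chars.join_cons_cons, pvJoinNil (q :: rest)]
    simp

theorem pvDigitNotAlpha (c : Char) (h : PySem.Chars.isdigit c = true) :
    PySem.Chars.isalpha c = false := by
  simp only [PySem.Chars.isdigit, PySem.Chars.isalpha, PySem.Chars.isupper, PySem.Chars.islower,
    Bool.and_eq_true, decide_eq_true_eq, Bool.or_eq_false_iff, Bool.and_eq_false_iff,
    decide_eq_false_iff_not, Char.le_def] at *
  simp only [UInt32.le_iff_toNat_le, show '0'.val.toNat = 48 from rfl, show '9'.val.toNat = 57 from rfl,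
    show 'A'.val.toNat = 65 from rfl, show 'Z'.val.toNat = 90 from rfl,
    show 'a'.val.toNat = 97 from rfl, show 'z'.val.toNat = 122 from rfl] at *
  omega

theorem pvTransA_eq (x y : Char) : pvTransA x y = pvSepNeeded (some (pvCat x)) (pvCat y) := by
  have h1 := pvDigitNotAlpha x
  have h2 := pvDigitNotAlpha y
  cases hax : PySem.Chars.isalpha x <;> cases hay : PySem.Chars.isalpha y <;>
    cases hdx : PySem.Chars.isdigit x <;> cases hdy : PySem.Chars.isdigit y <;>
      simp_all [pvTransA, pvCat, pvSepNeeded]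

theorem pvFoldA (sep : String) (suf : List Char) : ∀ (pre : List Char) (x : Char) (acc : List (List Char)),
    (PySem.List.pyRange ((pre.length : Int) + 1) (PySem.List.len (pre ++ x :: suf)) 1).foldl
      (pvStepA (pre ++ x :: suf) sep) acc = acc ++ pvPairsL sep x suf := by
  induction suf with
  | nil =>
    intro pre x acc
    rw [PySem.List.pyRange_one_eq_nil (by simp [PySem.List.len_eq])]
    simp [pvPairsL]
  | cons y suf ih =>
    intro pre x acc
    rw [PySem.List.pyRange_one_cons (by simp [PySem.List.len_eq])]
    simp only [List.foldl_cons]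
    have hstep : pvStepA (pre ++ x :: y :: suf) sep acc ((pre.length : Int) + 1)
        = (if pvTransA x y then acc ++ [sep.toList] else acc) ++ [[y]] := by
      have h1 : PySem.List.pyGetD (pre ++ x :: y :: suf) ((pre.length : Int) + 1) ' ' = y := by
        have he : ((pre.length : Int) + 1) = ((pre.length + 1 : Nat) : Int) := by omega
        rw [he, PySem.List.pyGetD_natCast]
        simp [List.getD]
      have h0 : PySem.List.pyGetD (pre ++ x :: y :: suf) ((pre.length : Int) + 1 - 1) ' ' = x := by
        have he : ((pre.length : Int) + 1 - 1) = ((pre.length : Nat) : Int) := by omega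
        rw [he, PySem.List.pyGetD_natCast]
        simp [List.getD]
      unfold pvStepA
      rw [h1, h0]
    rw [hstep]
    have harr : pre ++ x :: y :: suf = (pre ++ [x]) ++ y :: suf := by simp
    have hidx : ((pre.length : Int) + 1 + 1) = (((pre ++ [x]).length : Int) + 1) := by
      simp
    rw [harr, hidx, ih (pre ++ [x]) y]
    by_cases ht : pvTransA x y = true <;> simp [pvPairsL, ht, List.append_assoc]

theorem pvPairsL_flatten (sep : String) (suf : List Char) : ∀ (x : Char),
    (pvPairsL sep x suf).flatten = pvPairs sep.toList (pvCat x) suf := by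
  induction suf with
  | nil => intro x; simp [pvPairsL, pvPairs]
  | cons y r ih =>
    intro x
    rw [show pvPairsL sep x (y :: r) = (if pvTransA x y then [sep.toList] else []) ++ [[y]] ++ pvPairsL sep y r from rfl]
    rw [show pvPairs sep.toList (pvCat x) (y :: r)
        = (if pvSepNeeded (some (pvCat x)) (pvCat y) then sep.toList else []) ++ y :: pvPairs sep.toList (pvCat y) r from rfl]
    rw [← pvTransA_eq]
    by_cases ht : pvTransA x y = true <;> simp [ht, ih y]

theorem pvRunSkip (sep : List Char) (k : PvCat) (t : List Char) (r : List Char)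
    (ht : ∀ d ∈ t, pvCat d = k) : pvPairs sep k (t ++ r) = t ++ pvPairs sep k r := by
  induction t with
  | nil => simp
  | cons d t ih =>
    have hd : pvCat d = k := ht d (by simp)
    rw [List.cons_append,
      show pvPairs sep k (d :: (t ++ r))
        = (if pvSepNeeded (some k) (pvCat d) then sep else []) ++ d :: pvPairs sep (pvCat d) (t ++ r) from rfl,
      hd]
    simp [pvSepNeeded, ih (fun e he => ht e (by simp [he]))]

theorem pvAltGo_some (sep : List Char) : ∀ (n : Nat) (l : List Char), l.length ≤ n → ∀ (k : PvCat),
    pvAltGo sep (some k) l = pvPairs sep k l := by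
  intro n
  induction n with
  | zero =>
    intro l h k
    cases l with
    | nil => simp [pvAltGo, pvPairs]
    | cons c rest => simp at h
  | succ n ih =>
    intro l h k
    cases l with
    | nil => simp [pvAltGo, pvPairs]
    | cons c rest =>
      rw [pvAltGo]
      have hsplit := List.takeWhile_append_dropWhile (p := fun d => decide (pvCat d = pvCat c)) (l := rest)
      have htake : ∀ d ∈ rest.takeWhile (fun d => decide (pvCat d = pvCat c)), pvCat d = pvCat c := by
        intro d hdm
        have := List.mem_takeWhile_imp hdm
        simpa using this
      have hlen : (rest.dropWhile (fun d => decide (pvCat d = pvCat c))).length ≤ n := by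
        have := List.length_dropWhile_le (p := fun d => decide (pvCat d = pvCat c)) (l := rest)
        simp at h
        omega
      rw [show pvPairs sep k (c :: rest)
          = (if pvSepNeeded (some k) (pvCat c) then sep else []) ++ c :: pvPairs sep (pvCat c) rest from rfl]
      conv_rhs => rw [← hsplit]
      rw [pvRunSkip sep (pvCat c) _ _ htake, ih _ hlen (pvCat c)]
      simp [List.append_assoc]

theorem pvAltGo_none (sep : List Char) (c : Char) (rest : List Char) :
    pvAltGo sep none (c :: rest) = c :: pvPairs sep (pvCat c) rest := by
  rw [pvAltGo]
  simp only [pvSepNeeded, if_neg (by simp : ¬ (false = true))]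
  have hsplit := List.takeWhile_append_dropWhile (p := fun d => decide (pvCat d = pvCat c)) (l := rest)
  have htake : ∀ d ∈ rest.takeWhile (fun d => decide (pvCat d = pvCat c)), pvCat d = pvCat c := by
    intro d hdm
    have := List.mem_takeWhile_imp hdm
    simpa using this
  conv_rhs => rw [← hsplit]
  rw [pvRunSkip sep (pvCat c) _ _ htake,
    pvAltGo_some sep (rest.dropWhile (fun d => decide (pvCat d = pvCat c))).length _ le_rfl (pvCat c)]
  simp

-- ===== VERDICT (by name: the statement is the Claim_ definition above) =====
theorem insertar_separadores_py_spec : Claim_equal_insertar_separadores_py := by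
  intro codigo sep _
  unfold Spec_insertar_separadores_py insertar_separadores_py insertar_separadores_py_alt
  have hback : String.ofList codigo.toList = codigo := String.ofList_toList
  cases hl : codigo.toList with
  | nil =>
    simp only [List.isEmpty_nil, if_true]
    rw [← hback, hl, pvAltGo]
  | cons c rest =>
    simp only [List.isEmpty_cons, Bool.false_eq_true, if_false]
    have hfold := pvFoldA sep rest [] c [[PySem.List.pyGetD (c :: rest) 0 ' ']]
    simp only [List.nil_append, List.length_nil, Nat.cast_zero, zero_add] at hfold
    rw [hfold, pvJoinNil, PySem.List.pyGetD_zero_cons]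
    rw [pvAltGo_none]
    simp [pvPairsL_flatten]
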